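-- pv_equiv track=rewrite | github.com/oakoneric/mathTUD | Math-Ma-MSTAT/maketexable.py | insertWarnings
-- ===== SOURCE A (Python) =====
-- ALPHABET = "abcdefghijklmnopqrstuvwxyzABCDEFGHIJKLMNOPQRSTUVWXYZ*"
--
-- TOCHECK = "TOCHECK"
--
-- CHECKED = "CHECKED"
--
-- TEXCOMMENT = r"%"
--
-- def findNextCommand(text, command, pos):
--     """Find next occurence of the command command after pos in text.
--
--     command must include the backslash
--     Return the starting index of the command.
--     Return -1 if not found.
--     """
--     while True:
--         pos = text.find(command, pos)
--         if pos == -1: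
--             return -1
--         if pos + len(command) >= len(text):
--             # command at end of text
--             return pos
--         if text[pos + len(command)] not in ALPHABET:
--             return pos
--         else:
--             pos = pos + 1
--
-- def findNextCommandNotAsOpt(text, badCommand, pos):
--     """Find next instance of badCommand after pos in text that is not in [ ].
--
--     \\Big and \\big and \\bigg and \\Bigg
--     are not interesting if they are optional arguments
--     to \\set, \\klammern, etc. So ignore cases of those.
--     """
--     while pos != -1:
--         pos = findNextCommand(text, badCommand, pos)
--         if pos == -1:  # not found
--             return -1
--         if (pos == 0 or text[pos - 1] != "["
--             or pos + len(badCommand) >= len(text)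
--             or text[pos + len(badCommand)] != "]"):
--             return pos
--         # else:
--         pos = pos + 1  # do not find the same one again
--
-- def insertWarnings(lines, badCommand):
--     """Insert warnings after a command that is probably to be checked.
--
--     The text is to be given as a list of lines.
--     A command in this sense can be any text that is not to be
--     followed by an asciiletter
--     """
--     lineNumber = 0
--     while lineNumber < len(lines):
--         # if it is a comment, we do not need to check anything
--         # if it is already checked, indicated by # CHECKED: badCommand
--         # than we do not need to check anything either
--         # if there are more than one checked command, all should be
--         # mentioned in one following line
--         if (not (lines[lineNumber].lstrip().startswith(TEXCOMMENT)
--                  or (len(lines) > lineNumber + 1 and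
--                      (lines[lineNumber+1].lstrip().startswith(TEXCOMMENT)
--                          and CHECKED in lines[lineNumber+1]
--                          and badCommand in lines[lineNumber+1]
--                          )
--                      )
--                  )
--             ):
--             if badCommand in [r"\Big", r"\big", r"\Bigg", r"\bigg"]:
--                 pos = findNextCommandNotAsOpt(lines[lineNumber], badCommand, 0)
--             else:
--                 pos = findNextCommand(lines[lineNumber], badCommand, 0)
--             if pos != -1:  # if found
--                 lines.insert(
--                     lineNumber + 1,
--                     getIndentation(lines[lineNumber])
--                     + TEXCOMMENT + " " + TOCHECK + ": '"
--                     + badCommand + "' used.\n"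
--                 )
--         lineNumber = lineNumber + 1
--     return lines
--
-- def getIndentation(text):
--     """Get the leading whitespace of a string."""
--     for i in range(len(text)):
--         if not text[i].isspace():
--             return text[:i]
-- ===== SOURCE B (Python) =====
-- ALPHABET = "abcdefghijklmnopqrstuvwxyzABCDEFGHIJKLMNOPQRSTUVWXYZ*"
--
-- TOCHECK = "TOCHECK"
--
-- CHECKED = "CHECKED"
--
-- TEXCOMMENT = r"%"
--
-- def insertWarnings(lines, badCommand):
--     """Single forward pass: build a fresh output list, then write it back in place."""
--     checkOpt = badCommand in (r"\Big", r"\big", r"\Bigg", r"\bigg")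
--     n = len(badCommand)
--
--     def matchAt(text, p):
--         # a command occurrence at p: the text matches and is not followed by an
--         # ascii letter / '*'; for the \big family it must not sit inside [ ].
--         if text[p:p + n] != badCommand:
--             return False
--         if p + n < len(text) and text[p + n] in ALPHABET:
--             return False
--         if (checkOpt and p > 0 and text[p - 1] == "["
--                 and p + n < len(text) and text[p + n] == "]"):
--             return False
--         return True
--
--     def needsWarning(line, nxt):
--         if line.lstrip().startswith(TEXCOMMENT):
--             return False
--         if (nxt is not None and nxt.lstrip().startswith(TEXCOMMENT)
--                 and CHECKED in nxt and badCommand in nxt):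
--             return False
--         return any(matchAt(line, p) for p in range(len(line) - n + 1))
--
--     out = []
--     for line, nxt in zip(lines, lines[1:] + [None]):
--         out.append(line)
--         if needsWarning(line, nxt):
--             stripped = line.lstrip()
--             indent = line[:len(line) - len(stripped)]
--             out.append(indent + TEXCOMMENT + " " + TOCHECK + ": '"
--                        + badCommand + "' used.\n")
--     lines[:] = out
--     return lines
-- ===== Notes on version B (the rewrite author's own statement) =====
-- stated objective: simpler
-- what changed: Replaces the in-place while-loop that inserts into the list being scanned (re-visiting each inserted comment line) and the find-and-retry command search with a single forward pass over (line, next-line) pairs that builds a fresh output list, testing for a command occurrence by a direct positional scan (any over all positions) instead of the repeated str.find loops.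
import Mathlib
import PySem

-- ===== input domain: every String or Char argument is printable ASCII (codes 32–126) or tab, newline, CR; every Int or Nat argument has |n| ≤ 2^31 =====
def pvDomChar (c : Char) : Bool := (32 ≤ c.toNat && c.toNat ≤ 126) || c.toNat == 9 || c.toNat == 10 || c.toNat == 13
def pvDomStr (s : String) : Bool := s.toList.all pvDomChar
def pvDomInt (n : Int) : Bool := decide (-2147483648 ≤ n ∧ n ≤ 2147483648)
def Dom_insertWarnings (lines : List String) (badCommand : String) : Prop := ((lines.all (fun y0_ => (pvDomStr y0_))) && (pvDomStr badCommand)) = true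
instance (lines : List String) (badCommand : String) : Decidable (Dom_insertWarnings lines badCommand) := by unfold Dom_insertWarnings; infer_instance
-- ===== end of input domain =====

-- B replaces A's in-place while-loop (which inserts into the list being scanned and re-visits
-- the inserted comment) by a single forward pass over (line, next-line) pairs building a fresh
-- list, and replaces the find-and-retry command search by a direct positional scan (objective:
-- simpler).  Both Pythons mutate `lines` in place to the same final content and return it; the
-- equivalence proved here is about the returned value.

-- shared string literals of the module
def pvAlphabet : List Char := "abcdefghijklmnopqrstuvwxyzABCDEFGHIJKLMNOPQRSTUVWXYZ*".toList
def pvChecked : List Char := "CHECKED".toList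
def pvBigs : List (List Char) := ["\\Big".toList, "\\big".toList, "\\Bigg".toList, "\\bigg".toList]

-- ===== PORT A =====

-- `while True:` loop of findNextCommand (fuel = remaining positions, enough by construction)
def fncLoop (text command : List Char) : Nat → Nat → Int
  | 0, _ => -1
  | fuel+1, pos =>
    let p := PySem.Chars.findFrom text command (pos : Int) none
    if p = -1 then -1
    else if text.length ≤ p.toNat + command.length then p
    else if (text.getD (p.toNat + command.length) ' ') ∉ pvAlphabet then p
    else fncLoop text command fuel (p.toNat + 1)

def findNextCommand (text command : List Char) (pos : Nat) : Int :=
  fncLoop text command (text.length + 1 - pos) pos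

-- `while pos != -1:` loop of findNextCommandNotAsOpt
def fnaLoop (text badCommand : List Char) : Nat → Nat → Int
  | 0, _ => -1
  | fuel+1, pos =>
    let p := findNextCommand text badCommand pos
    if p = -1 then -1
    else if p = 0 ∨ text.getD (p.toNat - 1) ' ' ≠ '[' ∨ text.length ≤ p.toNat + badCommand.length
            ∨ text.getD (p.toNat + badCommand.length) ' ' ≠ ']' then p
    else fnaLoop text badCommand fuel (p.toNat + 1)

def findNextCommandNotAsOpt (text badCommand : List Char) (pos : Nat) : Int :=
  fnaLoop text badCommand (text.length + 2) pos

-- `for i in range(len(text)): if not text[i].isspace(): return text[:i]`  (None if it falls through)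
def giLoop (text : List Char) : List Char → Nat → Option (List Char)
  | [], _ => none
  | c :: rest, i => if !(PySem.Chars.isspace c) then some (text.take i) else giLoop text rest (i+1)

def getIndentation (text : List Char) : Option (List Char) :=
  giLoop text text 0

-- the inserted line; Python raises where getIndentation is None (excluded by Pre_, `.getD []` there)
def warnA (badCommand cur : List Char) : List Char :=
  (getIndentation cur).getD [] ++ "% TOCHECK: '".toList ++ badCommand ++ "' used.\n".toList

-- the `while lineNumber < len(lines):` loop, with the list mutated by list.insert
def loopA (badCommand : List Char) : Nat → List (List Char) → Nat → List (List Char)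
  | 0, lines, _ => lines
  | fuel+1, lines, i =>
    if i < lines.length then
      let cur := lines.getD i []
      if !(PySem.Chars.startswith (PySem.Chars.lstrip cur) ['%']
           || (decide (i + 1 < lines.length)
               && PySem.Chars.startswith (PySem.Chars.lstrip (lines.getD (i+1) [])) ['%']
               && PySem.Chars.isIn pvChecked (lines.getD (i+1) [])
               && PySem.Chars.isIn badCommand (lines.getD (i+1) []))) then
        let pos := if badCommand ∈ pvBigs then findNextCommandNotAsOpt cur badCommand 0
                   else findNextCommand cur badCommand 0
        if pos ≠ -1 then
          loopA badCommand fuel (PySem.List.insert lines ((i : Int) + 1) (warnA badCommand cur)) (i+1)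
        else loopA badCommand fuel lines (i+1)
      else loopA badCommand fuel lines (i+1)
    else lines

def insertWarnings (lines : List String) (badCommand : String) : List String :=
  (loopA badCommand.toList (2 * lines.length + 1) (lines.map String.toList) 0).map String.ofList

-- ===== PORT B =====

-- Source B matchAt: direct test for a command occurrence at position p
def matchAtB (badCommand : List Char) (checkOpt : Bool) (n : Nat) (text : List Char) (p : Int) : Bool :=
  if PySem.List.slice text (some p) (some (p + n)) ≠ badCommand then false
  else if decide (p + n < text.length) && (PySem.List.pyGetD text (p + n) ' ') ∈ pvAlphabet then false
  else if checkOpt && decide (0 < p) && decide (PySem.List.pyGetD text (p - 1) ' ' = '[')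
          && decide (p + n < text.length) && decide (PySem.List.pyGetD text (p + n) ' ' = ']') then false
  else true

-- Source B needsWarning
def needsWarningB (badCommand : List Char) (checkOpt : Bool) (n : Nat)
    (line : List Char) (nxt : Option (List Char)) : Bool :=
  if PySem.Chars.startswith (PySem.Chars.lstrip line) ['%'] then false
  else if (match nxt with
           | some t => PySem.Chars.startswith (PySem.Chars.lstrip t) ['%']
                       && PySem.Chars.isIn pvChecked t && PySem.Chars.isIn badCommand t
           | none => false) then false
  else (PySem.List.pyRange 0 ((line.length : Int) - n + 1) 1).any (fun p => matchAtB badCommand checkOpt n line p)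

-- Source B warning line: indent = line[:len(line) - len(line.lstrip())]
def warnB (badCommand line : List Char) : List Char :=
  PySem.List.slice line none (some ((line.length : Int) - ((PySem.Chars.lstrip line).length : Int)))
  ++ "% TOCHECK: '".toList ++ badCommand ++ "' used.\n".toList

def insertWarnings_alt (lines : List String) (badCommand : String) : List String :=
  let bad := badCommand.toList
  let checkOpt := bad ∈ pvBigs
  let n := bad.length
  let linesC := lines.map String.toList
  let nexts := (PySem.List.slice linesC (some 1) none).map some ++ [none]
  let out := (linesC.zip nexts).foldl
    (fun out lp =>
      let out := out ++ [lp.1]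
      if needsWarningB bad checkOpt n lp.1 lp.2 then out ++ [warnB bad lp.1] else out) []
  out.map String.ofList

-- ===== PRECONDITION & SPEC =====

-- the "excused by the next line" test used by Pre_ (on the absent next line it is false)
def pvSkipByNext (badCommand nxt : List Char) : Bool :=
  PySem.Chars.startswith (PySem.Chars.lstrip nxt) ['%']
  && PySem.Chars.isIn pvChecked nxt && PySem.Chars.isIn badCommand nxt

-- Pre_ excludes exactly the inputs where A raises TypeError: badCommand empty or all-whitespace
-- found inside an all-whitespace line that is not excused by a following '% … CHECKED' comment
-- (there getIndentation returns None and A crashes on `None + "%"`).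
def Pre_insertWarnings (lines : List String) (badCommand : String) : Prop :=
  badCommand.toList.all PySem.Chars.isspace = true →
  ∀ i : Nat, i < lines.length →
    ¬((lines.getD i "").toList.all PySem.Chars.isspace = true
      ∧ PySem.Chars.isIn badCommand.toList (lines.getD i "").toList = true
      ∧ pvSkipByNext badCommand.toList (lines.getD (i+1) "").toList = false)
instance (lines : List String) (badCommand : String) : Decidable (Pre_insertWarnings lines badCommand) := by
  unfold Pre_insertWarnings; infer_instance

def pvWitness_insertWarnings : List String × String := (["x \\foo y", "next"], "\\foo")

def Spec_insertWarnings (lines : List String) (badCommand : String) (out : List String) : Prop :=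
  out = insertWarnings_alt lines badCommand
instance (lines : List String) (badCommand : String) (out : List String) : Decidable (Spec_insertWarnings lines badCommand out) := by
  unfold Spec_insertWarnings; infer_instance

-- ===== CLAIM (what is proved, stated in full; the proofs are below) =====
def Claim_equal_insertWarnings : Prop := ∀ (lines : List String) (badCommand : String), Dom_insertWarnings lines badCommand → Pre_insertWarnings lines badCommand → Spec_insertWarnings lines badCommand (insertWarnings lines badCommand)
-- ===== LEMMAS AND PROOFS =====

-- a first index search: first q with pos ≤ q < pos + r and P q, else -1
def pvFirstAux (P : Nat → Bool) : Nat → Nat → Int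
  | 0, _ => -1
  | r+1, pos => if P pos then (pos : Int) else pvFirstAux P r (pos+1)

def pvFirst (P : Nat → Bool) (bound pos : Nat) : Int := pvFirstAux P (bound - pos) pos

-- A-side predicates (as Booleans on the match position)
def pvM1 (text command : List Char) (p : Nat) : Bool :=
  decide (command <+: text.drop p)
  && (decide (text.length ≤ p + command.length) || decide ((text.getD (p + command.length) ' ') ∉ pvAlphabet))

def pvM2 (text badCommand : List Char) (p : Nat) : Bool :=
  pvM1 text badCommand p
  && !(decide (0 < p) && decide (text.getD (p - 1) ' ' = '[')
       && decide (p + badCommand.length < text.length) && decide (text.getD (p + badCommand.length) ' ' = ']'))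

theorem pvFirstAux_eq_neg_one_iff (P : Nat → Bool) (r pos : Nat) :
    pvFirstAux P r pos = -1 ↔ ∀ q, pos ≤ q → q < pos + r → P q = false := by
  induction r generalizing pos with
  | zero => simp [pvFirstAux]; omega
  | succ r ih =>
    simp only [pvFirstAux]
    by_cases h : P pos = true
    · simp only [h, if_true]
      constructor
      · intro hc; exact absurd hc (by simp)
      · intro hall; exact absurd (hall pos le_rfl (by omega)) (by simp [h])
    · rw [if_neg h, ih]
      constructor
      · intro hall q hq1 hq2
        rcases Nat.eq_or_lt_of_le hq1 with rfl | hlt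
        · exact Bool.eq_false_iff.mpr h
        · exact hall q hlt (by omega)
      · intro hall q hq1 hq2; exact hall q (by omega) (by omega)

theorem pvFirstAux_eq_of (P : Nat → Bool) (r pos q : Nat)
    (h1 : pos ≤ q) (h2 : q < pos + r) (hP : P q = true)
    (hmin : ∀ j, pos ≤ j → j < q → P j = false) :
    pvFirstAux P r pos = (q : Int) := by
  induction r generalizing pos with
  | zero => omega
  | succ r ih =>
    simp only [pvFirstAux]
    rcases Nat.eq_or_lt_of_le h1 with rfl | hlt
    · rw [if_pos hP]
    · have hp : P pos = false := hmin pos le_rfl hlt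
      rw [if_neg (by simp [hp])]
      exact ih (pos+1) hlt (by omega) (fun j hj1 hj2 => hmin j (by omega) hj2)

theorem pvFirst_unfold (P : Nat → Bool) (bound pos : Nat) (h : pos < bound) :
    pvFirst P bound pos = if P pos then (pos : Int) else pvFirst P bound (pos+1) := by
  unfold pvFirst
  have h2 : bound - pos = (bound - (pos+1)) + 1 := by omega
  rw [h2]; rfl

theorem pvFirst_skip (P : Nat → Bool) (bound pos pos' : Nat)
    (h1 : pos ≤ pos') (h2 : pos' ≤ bound)
    (h : ∀ q, pos ≤ q → q < pos' → P q = false) :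
    pvFirst P bound pos = pvFirst P bound pos' := by
  induction pos', h1 using Nat.le_induction with
  | base => rfl
  | succ m hm ih =>
    rw [ih (by omega) (fun q hq1 hq2 => h q hq1 (by omega)),
        pvFirst_unfold P bound m (by omega), if_neg (by simp [h m hm (by omega)])]

theorem pvFirst_eq_neg_one_iff (P : Nat → Bool) (bound pos : Nat) (h : pos ≤ bound) :
    pvFirst P bound pos = -1 ↔ ∀ q, pos ≤ q → q < bound → P q = false := by
  unfold pvFirst
  rw [pvFirstAux_eq_neg_one_iff]
  constructor <;> intro hall q hq1 hq2 <;> exact hall q hq1 (by omega)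

theorem pvFirst_eq_of (P : Nat → Bool) (bound pos q : Nat)
    (h1 : pos ≤ q) (h2 : q < bound) (hP : P q = true)
    (hmin : ∀ j, pos ≤ j → j < q → P j = false) :
    pvFirst P bound pos = (q : Int) :=
  pvFirstAux_eq_of P (bound - pos) pos q h1 (by omega) hP hmin

theorem pvFirstAux_spec (P : Nat → Bool) : ∀ (r pos : Nat), pvFirstAux P r pos ≠ -1 →
    ∃ q : Nat, pvFirstAux P r pos = (q : Int) ∧ pos ≤ q ∧ q < pos + r ∧ P q = true
      ∧ ∀ j, pos ≤ j → j < q → P j = false := by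
  intro r
  induction r with
  | zero => intro pos h; exact absurd rfl h
  | succ r ih =>
    intro pos h
    by_cases hp : P pos = true
    · exact ⟨pos, by simp [pvFirstAux, hp], le_rfl, by omega, hp, fun j h1 h2 => by omega⟩
    · have he : pvFirstAux P (r+1) pos = pvFirstAux P r (pos+1) := by
        simp only [pvFirstAux]; rw [if_neg hp]
      rw [he] at h ⊢
      obtain ⟨q, h1, h2, h3, h4, h5⟩ := ih (pos+1) h
      refine ⟨q, h1, by omega, by omega, h4, fun j hj1 hj2 => ?_⟩
      rcases Nat.eq_or_lt_of_le hj1 with rfl | hlt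
      · exact Bool.eq_false_iff.mpr hp
      · exact h5 j hlt hj2

theorem pvFirst_spec (P : Nat → Bool) (bound pos : Nat) (hpos : pos ≤ bound)
    (h : pvFirst P bound pos ≠ -1) :
    ∃ q : Nat, pvFirst P bound pos = (q : Int) ∧ pos ≤ q ∧ q < bound ∧ P q = true
      ∧ ∀ j, pos ≤ j → j < q → P j = false := by
  obtain ⟨q, h1, h2, h3, h4, h5⟩ := pvFirstAux_spec P (bound - pos) pos h
  exact ⟨q, h1, h2, by omega, h4, h5⟩

theorem pvNoOcc (text command : List Char) (pos q : Nat) (hq : pos ≤ q)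
    (hno : ¬ command <:+: text.drop pos) : pvM1 text command q = false := by
  have : ¬ command <+: text.drop q := by
    intro hc
    apply hno
    have hd : text.drop q = (text.drop pos).drop (q - pos) := by
      rw [List.drop_drop]; congr 1; omega
    rw [hd] at hc
    exact hc.isInfix.trans (List.drop_suffix _ _).isInfix
  simp [pvM1, this]

-- findFrom characterisation used below
theorem fnc_spec (text command : List Char) : ∀ fuel pos, pos ≤ text.length →
    text.length + 1 ≤ fuel + pos →
    fncLoop text command fuel pos = pvFirst (pvM1 text command) (text.length + 1) pos := by
  intro fuel
  induction fuel with
  | zero => intro pos h1 h2; omega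
  | succ f ih =>
    intro pos h1 h2
    simp only [fncLoop]
    by_cases hp : PySem.Chars.findFrom text command (pos : Int) none = -1
    · rw [if_pos hp]
      symm
      rw [pvFirst_eq_neg_one_iff _ _ _ (by omega)]
      intro q hq1 hq2
      exact pvNoOcc text command pos q hq1
        ((PySem.Chars.findFrom_natCast_eq_neg_one_iff text command pos h1).mp hp)
    · rw [if_neg hp]
      obtain ⟨hge, hprefix, hmin⟩ := PySem.Chars.findFrom_natCast_spec text command pos h1 hp
      have hr0 : (0 : Int) ≤ PySem.Chars.findFrom text command (pos : Int) none :=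
        le_trans (by exact_mod_cast Nat.zero_le pos) hge
      have hrlen : PySem.Chars.findFrom text command (pos : Int) none ≤ (text.length : Int) := by
        have hc := PySem.Chars.findFrom_natCast text command pos h1
        by_cases hf : PySem.Chars.find (text.drop pos) command = -1
        · exact absurd (by rw [hc, if_pos hf]) hp
        · rw [hc, if_neg hf]
          have := PySem.Chars.find_le_length (text.drop pos) command
          have hl : ((text.drop pos).length : Int) = (text.length : Int) - pos := by
            simp [List.length_drop]; omega
          omega
      set r := PySem.Chars.findFrom text command (pos : Int) none with hrdef
      have hqr : ((r.toNat : Nat) : Int) = r := Int.toNat_of_nonneg hr0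
      have hposr : pos ≤ r.toNat := by omega
      have hrlen' : r.toNat ≤ text.length := by omega
      have hminN : ∀ j, pos ≤ j → j < r.toNat → pvM1 text command j = false := by
        intro j hj1 hj2
        simp [pvM1, hmin j hj1 hj2]
      by_cases hend : text.length ≤ r.toNat + command.length
      · rw [if_pos hend, ← hqr]
        exact (pvFirst_eq_of _ _ _ _ hposr (by omega)
          (by simp [pvM1, hprefix, hend]) hminN).symm
      · rw [if_neg hend]
        by_cases halpha : (text.getD (r.toNat + command.length) ' ') ∉ pvAlphabet
        · have halphaB : text[r.toNat + command.length]?.getD ' ' ∉ pvAlphabet := by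
            simpa [List.getD_eq_getElem?_getD] using halpha
          rw [if_pos halpha, ← hqr]
          exact (pvFirst_eq_of _ _ _ _ hposr (by omega)
            (by simp [pvM1, hprefix, hend, halphaB]) hminN).symm
        · have halpha2 : text[r.toNat + command.length]?.getD ' ' ∈ pvAlphabet := by
            have := not_not.mp halpha
            simpa [List.getD_eq_getElem?_getD] using this
          rw [if_neg halpha]
          rw [ih (r.toNat + 1) (by omega) (by omega)]
          apply (pvFirst_skip _ _ _ _ (by omega) (by omega) ?_).symm
          intro q hq1 hq2
          rcases Nat.lt_or_ge q r.toNat with hlt | hge'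
          · exact hminN q hq1 hlt
          · have hqe : q = r.toNat := by omega
            subst hqe
            simp [pvM1, hend, halpha2]

theorem findNextCommand_spec (text command : List Char) (pos : Nat) (h : pos ≤ text.length) :
    findNextCommand text command pos = pvFirst (pvM1 text command) (text.length + 1) pos := by
  apply fnc_spec text command _ pos h; omega

theorem fna_spec (text badCommand : List Char) : ∀ fuel pos, pos ≤ text.length →
    text.length + 2 ≤ fuel + pos →
    fnaLoop text badCommand fuel pos = pvFirst (pvM2 text badCommand) (text.length + 1) pos := by
  intro fuel
  induction fuel with
  | zero => intro pos h1 h2; omega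
  | succ f ih =>
    intro pos h1 h2
    simp only [fnaLoop]
    rw [findNextCommand_spec text badCommand pos h1]
    by_cases hp : pvFirst (pvM1 text badCommand) (text.length + 1) pos = -1
    · rw [if_pos hp]
      symm
      rw [pvFirst_eq_neg_one_iff _ _ _ (by omega)]
      rw [pvFirst_eq_neg_one_iff _ _ _ (by omega)] at hp
      intro q hq1 hq2
      simp [pvM2, hp q hq1 hq2]
    · obtain ⟨q, hq, hq1, hq2, hq3, hq4⟩ := pvFirst_spec _ _ _ (by omega) hp
      rw [hq]
      have hqt : ((q : Int)).toNat = q := Int.toNat_natCast q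
      rw [if_neg (by omega), hqt]
      by_cases hb : 0 < q ∧ text.getD (q - 1) ' ' = '[' ∧ q + badCommand.length < text.length
          ∧ text.getD (q + badCommand.length) ' ' = ']'
      · rw [if_neg (by
          push Not
          exact ⟨by exact_mod_cast (show q ≠ 0 by omega), hb.2.1, by omega, hb.2.2.2⟩)]
        rw [ih (q + 1) (by omega) (by omega)]
        apply (pvFirst_skip _ _ _ _ (by omega) (by omega) ?_).symm
        intro j hj1 hj2
        rcases Nat.lt_or_ge j q with hlt | hge'
        · simp [pvM2, hq4 j hj1 hlt]
        · have hje : j = q := by omega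
          subst hje
          have hX : (decide (0 < j) && decide (text.getD (j - 1) ' ' = '[')
              && decide (j + badCommand.length < text.length)
              && decide (text.getD (j + badCommand.length) ' ' = ']')) = true := by
            simp only [Bool.and_eq_true, decide_eq_true_eq]
            exact ⟨⟨⟨hb.1, hb.2.1⟩, hb.2.2.1⟩, hb.2.2.2⟩
          unfold pvM2
          rw [hq3, hX]
          rfl
      · rw [if_pos ?_]
        · have hX : (decide (0 < q) && decide (text.getD (q - 1) ' ' = '[')
              && decide (q + badCommand.length < text.length)
              && decide (text.getD (q + badCommand.length) ' ' = ']')) = false := by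
            rw [Bool.eq_false_iff]
            intro hXt
            simp only [Bool.and_eq_true, decide_eq_true_eq] at hXt
            exact hb ⟨hXt.1.1.1, hXt.1.1.2, hXt.1.2, hXt.2⟩
          exact (pvFirst_eq_of _ _ _ _ hq1 hq2
            (by unfold pvM2; rw [hq3, hX]; rfl)
            (fun j hj1 hj2 => by simp [pvM2, hq4 j hj1 hj2])).symm
        · by_cases hb1 : 0 < q
          · by_cases hb2 : text.getD (q - 1) ' ' = '['
            · by_cases hb3 : q + badCommand.length < text.length
              · have hb4 : text.getD (q + badCommand.length) ' ' ≠ ']' :=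
                  fun h4 => hb ⟨hb1, hb2, hb3, h4⟩
                tauto
              · right; right; left; omega
            · tauto
          · left
            exact_mod_cast (show q = 0 by omega)

theorem findNextCommandNotAsOpt_spec (text badCommand : List Char) (pos : Nat) (h : pos ≤ text.length) :
    findNextCommandNotAsOpt text badCommand pos = pvFirst (pvM2 text badCommand) (text.length + 1) pos := by
  apply fna_spec text badCommand _ pos h; omega

-- the match predicate of B agrees with A's, position by position
theorem matchAtB_eq_M (text badCommand : List Char) (checkOpt : Bool) (p : Nat) :
    matchAtB badCommand checkOpt badCommand.length text (p : Int)
      = (if checkOpt then pvM2 text badCommand p else pvM1 text badCommand p) := by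
  have hcast : (p : Int) + (badCommand.length : Int) = ((p + badCommand.length : Nat) : Int) := by
    push_cast; ring
  have hslice : (PySem.List.slice text (some (p : Int)) (some ((p : Int) + (badCommand.length : Int))) = badCommand)
      ↔ badCommand <+: text.drop p := by
    rw [hcast, PySem.List.slice_natCast, Nat.add_sub_cancel_left]
    constructor
    · intro h; rw [← h]; exact List.take_prefix _ _
    · intro h; exact (List.prefix_iff_eq_take.mp h).symm
  have hget : PySem.List.pyGetD text ((p : Int) + (badCommand.length : Int)) ' ' = text.getD (p + badCommand.length) ' ' := by
    rw [hcast, PySem.List.pyGetD_natCast]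
  have hlt : ((p : Int) + (badCommand.length : Int) < (text.length : Int)) ↔ p + badCommand.length < text.length := by
    omega
  have hle : (text.length ≤ p + badCommand.length) ↔ ¬ (p + badCommand.length < text.length) := by omega
  have hp0i : ((0 : Int) < (p : Int)) ↔ 0 < p := by omega
  cases checkOpt with
  | false =>
    by_cases h1 : badCommand <+: text.drop p <;>
      by_cases h2 : p + badCommand.length < text.length <;>
        by_cases h3 : text[p + badCommand.length]?.getD ' ' ∈ pvAlphabet <;>
          simp [matchAtB, pvM1, hslice, hget, hlt, hle, h1, h2, h3, List.getD_eq_getElem?_getD]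
  | true =>
    by_cases hp0 : 0 < p
    · have hcast1 : (p : Int) - 1 = ((p - 1 : Nat) : Int) := by omega
      have hget1 : PySem.List.pyGetD text ((p : Int) - 1) ' ' = text.getD (p - 1) ' ' := by
        rw [hcast1, PySem.List.pyGetD_natCast]
      by_cases h1 : badCommand <+: text.drop p <;>
        by_cases h2 : p + badCommand.length < text.length <;>
          by_cases h3 : text[p + badCommand.length]?.getD ' ' ∈ pvAlphabet <;>
            by_cases h4 : text[p - 1]?.getD ' ' = '[' <;>
              by_cases h5 : text[p + badCommand.length]?.getD ' ' = ']' <;>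
                simp [matchAtB, pvM1, pvM2, hslice, hget, hget1, hlt, hle, hp0i, h1, h2, h3, h4, h5,
                      hp0, List.getD_eq_getElem?_getD]
    · by_cases h1 : badCommand <+: text.drop p <;>
        by_cases h2 : p + badCommand.length < text.length <;>
          by_cases h3 : text[p + badCommand.length]?.getD ' ' ∈ pvAlphabet <;>
            simp [matchAtB, pvM1, pvM2, hslice, hget, hlt, hle, hp0i, h1, h2, h3, hp0,
                  List.getD_eq_getElem?_getD]

theorem pvM1_prefix (text badCommand : List Char) (q : Nat) (h : pvM1 text badCommand q = true) :
    badCommand <+: text.drop q := by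
  unfold pvM1 at h
  rw [Bool.and_eq_true] at h
  exact of_decide_eq_true h.1

theorem pvM2_M1 (text badCommand : List Char) (q : Nat) (h : pvM2 text badCommand q = true) :
    pvM1 text badCommand q = true := by
  unfold pvM2 at h
  rw [Bool.and_eq_true] at h
  exact h.1

-- found-by-A iff found-by-B
theorem found_iff (text badCommand : List Char) :
    ((if badCommand ∈ pvBigs then findNextCommandNotAsOpt text badCommand 0
      else findNextCommand text badCommand 0) ≠ -1)
    ↔ (PySem.List.pyRange 0 ((text.length : Int) - badCommand.length + 1) 1).any
        (fun p => matchAtB badCommand (decide (badCommand ∈ pvBigs)) badCommand.length text p) = true := by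
  have hM : ∀ q : Nat, matchAtB badCommand (decide (badCommand ∈ pvBigs)) badCommand.length text (q : Int)
      = (if badCommand ∈ pvBigs then pvM2 text badCommand q else pvM1 text badCommand q) := by
    intro q
    rw [matchAtB_eq_M]
    by_cases hb : badCommand ∈ pvBigs <;> simp [hb]
  have hP1 : ∀ q : Nat, (if badCommand ∈ pvBigs then pvM2 text badCommand q else pvM1 text badCommand q) = true
      → badCommand <+: text.drop q := by
    intro q hq
    by_cases hb : badCommand ∈ pvBigs
    · rw [if_pos hb] at hq; exact pvM1_prefix _ _ _ (pvM2_M1 _ _ _ hq)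
    · rw [if_neg hb] at hq; exact pvM1_prefix _ _ _ hq
  have hL : (if badCommand ∈ pvBigs then findNextCommandNotAsOpt text badCommand 0
      else findNextCommand text badCommand 0)
      = pvFirst (fun q => if badCommand ∈ pvBigs then pvM2 text badCommand q else pvM1 text badCommand q)
          (text.length + 1) 0 := by
    by_cases hb : badCommand ∈ pvBigs
    · rw [if_pos hb, findNextCommandNotAsOpt_spec text badCommand 0 (Nat.zero_le _)]
      congr 1; funext q; rw [if_pos hb]
    · rw [if_neg hb, findNextCommand_spec text badCommand 0 (Nat.zero_le _)]
      congr 1; funext q; rw [if_neg hb]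
  rw [hL]
  constructor
  · intro hne
    obtain ⟨q, _, _, hqb, hPq, _⟩ := pvFirst_spec _ _ 0 (by omega) hne
    have hPq' : (if badCommand ∈ pvBigs then pvM2 text badCommand q else pvM1 text badCommand q) = true := hPq
    have hpre := hP1 q hPq'
    have hqlen : q + badCommand.length ≤ text.length := by
      have hll := hpre.length_le
      simp only [List.length_drop] at hll
      omega
    rw [List.any_eq_true]
    refine ⟨(q : Int), ?_, ?_⟩
    · rw [PySem.List.mem_pyRange_one]
      constructor
      · omega
      · omega
    · rw [hM q]; exact hPq'
  · intro hany
    rw [List.any_eq_true] at hany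
    obtain ⟨x, hx, hmt⟩ := hany
    rw [PySem.List.mem_pyRange_one] at hx
    obtain ⟨hx0, hxlt⟩ := hx
    have hxq : x = ((x.toNat : Nat) : Int) := (Int.toNat_of_nonneg hx0).symm
    have hqlen : x.toNat < text.length + 1 := by omega
    rw [hxq, hM x.toNat] at hmt
    intro hcon
    rw [pvFirst_eq_neg_one_iff _ _ _ (by omega)] at hcon
    have hfalse := hcon x.toNat (Nat.zero_le _) hqlen
    simp only [] at hfalse
    rw [hfalse] at hmt
    exact absurd hmt (by simp)

-- getIndentation on a line with a non-whitespace character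
theorem giLoop_eq (text : List Char) : ∀ (s : List Char) (i : Nat), s.all PySem.Chars.isspace = false →
    giLoop text s i = some (text.take (i + (s.takeWhile PySem.Chars.isspace).length)) := by
  intro s
  induction s with
  | nil => intro i h; simp at h
  | cons c rest ih =>
    intro i h
    by_cases hc : PySem.Chars.isspace c = true
    · have hr : rest.all PySem.Chars.isspace = false := by
        simpa [List.all_cons, hc] using h
      simp only [giLoop]
      rw [if_neg (by simp [hc]), ih (i+1) hr]
      simp only [List.takeWhile_cons, hc, if_true, List.length_cons]
      congr 2
      omega
    · simp only [giLoop]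
      rw [if_pos (by simp [hc])]
      simp [Bool.eq_false_iff.mpr hc]

theorem getIndentation_eq (l : List Char) (h : l.all PySem.Chars.isspace = false) :
    getIndentation l = some (l.takeWhile PySem.Chars.isspace) := by
  unfold getIndentation
  rw [giLoop_eq l l 0 h]
  simp only [Nat.zero_add]
  exact congrArg some (List.prefix_iff_eq_take.mp (List.takeWhile_prefix _)).symm

theorem pvIndent_eq (l : List Char) :
    PySem.List.slice l none (some ((l.length : Int) - ((PySem.Chars.lstrip l).length : Int)))
      = l.takeWhile PySem.Chars.isspace := by
  have hlen : (l.takeWhile PySem.Chars.isspace).length + (l.dropWhile PySem.Chars.isspace).length = l.length := by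
    rw [← List.length_append, List.takeWhile_append_dropWhile]
  have hc : (l.length : Int) - ((PySem.Chars.lstrip l).length : Int)
      = (((l.takeWhile PySem.Chars.isspace).length : Nat) : Int) := by
    simp only [PySem.Chars.lstrip]
    omega
  rw [hc, PySem.List.slice_to_natCast]
  exact (List.prefix_iff_eq_take.mp (List.takeWhile_prefix _)).symm

theorem warnA_eq_warnB (badCommand l : List Char) (h : l.all PySem.Chars.isspace = false) :
    warnA badCommand l = warnB badCommand l := by
  unfold warnA warnB
  rw [getIndentation_eq l h, pvIndent_eq]
  rfl

-- B as a structural recursion over (line, next line) pairs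
def pvEmit (badCommand l : List Char) (nxt : Option (List Char)) : Bool :=
  needsWarningB badCommand (decide (badCommand ∈ pvBigs)) badCommand.length l nxt

def procB (badCommand : List Char) : List (List Char) → List (List Char)
  | [] => []
  | l :: rest => l :: (if pvEmit badCommand l rest.head? then [warnB badCommand l] else []) ++ procB badCommand rest

theorem pvZip_cons (l : List Char) (rest : List (List Char)) :
    ((l :: rest).zip ((rest).map some ++ [none]))
      = (l, rest.head?) :: (rest.zip ((rest.drop 1).map some ++ [none])) := by
  cases rest <;> rfl

theorem foldB_eq (bad : List Char) :
    ∀ (L : List (List Char)) (acc : List (List Char)),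
      (L.zip ((L.drop 1).map some ++ [none])).foldl
        (fun out lp =>
          if needsWarningB bad (decide (bad ∈ pvBigs)) bad.length lp.1 lp.2 then
            (out ++ [lp.1]) ++ [warnB bad lp.1]
          else out ++ [lp.1]) acc
      = acc ++ procB bad L := by
  intro L
  induction L with
  | nil => intro acc; simp [procB]
  | cons l rest ih =>
    intro acc
    rw [show (l :: rest).drop 1 = rest from rfl, pvZip_cons, List.foldl_cons, ih]
    rw [show procB bad (l :: rest)
        = l :: (if pvEmit bad l rest.head? then [warnB bad l] else []) ++ procB bad rest from rfl]
    by_cases h : needsWarningB bad (decide (bad ∈ pvBigs)) bad.length l rest.head? = true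
    · simp [pvEmit, h, List.append_assoc]
    · simp [pvEmit, h, List.append_assoc]

theorem alt_eq_procB (lines : List String) (badCommand : String) :
    insertWarnings_alt lines badCommand = (procB badCommand.toList (lines.map String.toList)).map String.ofList := by
  unfold insertWarnings_alt
  dsimp only
  rw [PySem.List.slice_from_one, ← List.drop_one, foldB_eq]
  simp

-- raise-freedom hypothesis, in recursive form
def pvHyp (badCommand : List Char) : List (List Char) → Prop
  | [] => True
  | l :: rest =>
    (badCommand.all PySem.Chars.isspace = true →
      ¬(l.all PySem.Chars.isspace = true ∧ PySem.Chars.isIn badCommand l = true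
        ∧ pvSkipByNext badCommand (rest.head?.getD []) = false)) ∧ pvHyp badCommand rest

theorem pvHyp_of_not (bad : List Char) (h : bad.all PySem.Chars.isspace = false) :
    ∀ L, pvHyp bad L := by
  intro L
  induction L with
  | nil => trivial
  | cons l rest ih => exact ⟨fun hw => absurd hw (by simp [h]), ih⟩

theorem hyp_of_forall (bad : List Char) :
    ∀ L : List (List Char), (∀ i : Nat, i < L.length →
      ¬(((L.getD i []).all PySem.Chars.isspace = true) ∧ PySem.Chars.isIn bad (L.getD i []) = true
        ∧ pvSkipByNext bad (L.getD (i+1) []) = false)) → pvHyp bad L := by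
  intro L
  induction L with
  | nil => intro _; trivial
  | cons l rest ih =>
    intro h
    refine ⟨fun _ => ?_, ih (fun i hi hc => h (i+1) (by simpa using hi) (by simpa using hc))⟩
    have h0 := h 0 (by simp)
    cases rest <;> simpa using h0

theorem pvGetD_map_toList (lines : List String) (i : Nat) :
    (lines.map String.toList).getD i [] = (lines.getD i "").toList := by
  rw [List.getD_eq_getElem?_getD, List.getD_eq_getElem?_getD, List.getElem?_map]
  cases lines[i]? <;> rfl

theorem pre_to_hyp (lines : List String) (badCommand : String) (h : Pre_insertWarnings lines badCommand) :
    pvHyp badCommand.toList (lines.map String.toList) := by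
  by_cases hw : badCommand.toList.all PySem.Chars.isspace = true
  · apply hyp_of_forall
    intro i hi hc
    refine h hw i (by simpa using hi) ?_
    rw [← pvGetD_map_toList, ← pvGetD_map_toList]
    exact hc
  · exact pvHyp_of_not _ (Bool.eq_false_iff.mpr hw) _

-- the warning line is itself a %-comment
theorem pvComment_of_ws_prefix (a b : List Char) (ha : ∀ x ∈ a, PySem.Chars.isspace x = true) :
    PySem.Chars.startswith (PySem.Chars.lstrip (a ++ '%' :: b)) ['%'] = true := by
  simp only [PySem.Chars.lstrip, List.dropWhile_append]
  have h1 : a.dropWhile PySem.Chars.isspace = [] := by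
    rw [List.dropWhile_eq_nil_iff]
    exact fun x hx => ha x hx
  rw [h1]
  simp only [List.isEmpty_nil, if_true, List.dropWhile_cons]
  rw [if_neg (by decide)]
  simp [PySem.Chars.startswith, List.isPrefixOf]

theorem pvComment_of_ws_head (a b : List Char) (ha : ∀ x ∈ a, PySem.Chars.isspace x = true)
    (hb : b.head? = some '%') :
    PySem.Chars.startswith (PySem.Chars.lstrip (a ++ b)) ['%'] = true := by
  cases b with
  | nil => simp at hb
  | cons c b' =>
    obtain rfl : c = '%' := by simpa using hb
    exact pvComment_of_ws_prefix a b' ha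

theorem warnB_comment (badCommand l : List Char) :
    PySem.Chars.startswith (PySem.Chars.lstrip (warnB badCommand l)) ['%'] = true := by
  unfold warnB
  rw [pvIndent_eq]
  have e : "% TOCHECK: '".toList = '%' :: " TOCHECK: '".toList := by decide
  simp only [List.append_assoc]
  refine pvComment_of_ws_head _ _ (fun x hx => List.mem_takeWhile_imp hx) ?_
  rw [e]
  rfl

theorem pvTake_append (pre : List (List Char)) (x : List Char) (rest : List (List Char)) :
    (pre ++ x :: rest).take (pre.length + 1) = pre ++ [x] := by
  induction pre with
  | nil => simp
  | cons a pre ih => simpa using ih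

theorem pvDrop_append (pre : List (List Char)) (x : List Char) (rest : List (List Char)) :
    (pre ++ x :: rest).drop (pre.length + 1) = rest := by
  induction pre with
  | nil => simp
  | cons a pre ih => simpa using ih

theorem pvGetD_append (pre : List (List Char)) (x : List Char) (rest : List (List Char)) :
    (pre ++ x :: rest).getD pre.length [] = x := by
  rw [List.getD_eq_getElem?_getD, List.getElem?_append_right le_rfl]
  simp

theorem pvGetD_append_succ (pre : List (List Char)) (x : List Char) (rest : List (List Char)) :
    (pre ++ x :: rest).getD (pre.length + 1) [] = rest.head?.getD [] := by
  rw [List.getD_eq_getElem?_getD, List.getElem?_append_right (by omega)]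
  have h : pre.length + 1 - pre.length = 1 := by omega
  rw [h]
  cases rest <;> rfl

theorem matchAt_slice (bad : List Char) (c : Bool) (n : Nat) (text : List Char) (p : Int)
    (h : matchAtB bad c n text p = true) :
    PySem.List.slice text (some p) (some (p + n)) = bad := by
  unfold matchAtB at h
  by_cases hs : PySem.List.slice text (some p) (some (p + n)) ≠ bad
  · rw [if_pos hs] at h; exact absurd h (by simp)
  · exact not_not.mp hs

theorem needsB_eq (bad l : List Char) (rest : List (List Char)) :
    needsWarningB bad (decide (bad ∈ pvBigs)) bad.length l rest.head?
      = (!(PySem.Chars.startswith (PySem.Chars.lstrip l) ['%'] || pvSkipByNext bad (rest.head?.getD []))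
         && (PySem.List.pyRange 0 ((l.length : Int) - bad.length + 1) 1).any
              (fun p => matchAtB bad (decide (bad ∈ pvBigs)) bad.length l p)) := by
  cases rest with
  | nil =>
    unfold needsWarningB
    simp only [List.head?_nil, Option.getD_none]
    have h0 : pvSkipByNext bad [] = false := rfl
    rw [h0, Bool.or_false]
    by_cases hsw : PySem.Chars.startswith (PySem.Chars.lstrip l) ['%'] = true
    · simp [hsw]
    · simp [hsw]
  | cons t ts =>
    unfold needsWarningB
    simp only [List.head?_cons, Option.getD_some]
    by_cases hsw : PySem.Chars.startswith (PySem.Chars.lstrip l) ['%'] = true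
    · simp [hsw]
    · by_cases hsk : pvSkipByNext bad t = true
      · have hsk' := hsk
        unfold pvSkipByNext at hsk'
        simp [hsw, hsk, hsk']
      · have hsk0 : pvSkipByNext bad t = false := Bool.eq_false_iff.mpr hsk
        have hsk' : (PySem.Chars.startswith (PySem.Chars.lstrip t) ['%']
            && PySem.Chars.isIn pvChecked t && PySem.Chars.isIn bad t) = false := by
          have := hsk0
          unfold pvSkipByNext at this
          exact this
        simp [hsw, hsk0, hsk']

-- the central loop invariant: A's in-place loop produces B's single pass
theorem loopA_eq (badCommand : List Char) : ∀ (rest done : List (List Char)) (fuel : Nat),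
    2 * rest.length + 1 ≤ fuel → pvHyp badCommand rest →
    loopA badCommand fuel (done ++ rest) done.length = done ++ procB badCommand rest := by
  intro rest
  induction rest with
  | nil =>
    intro done fuel hf _
    obtain ⟨f, rfl⟩ : ∃ f, fuel = f + 1 := ⟨fuel - 1, by omega⟩
    simp [loopA, procB]
  | cons l rest ih =>
    intro done fuel hf hhyp
    simp only [List.length_cons] at hf
    obtain ⟨f, rfl⟩ : ∃ f, fuel = (f + 1) + 1 := ⟨fuel - 2, by omega⟩
    have hf' : 2 * rest.length + 1 ≤ f := by omega
    have hlt : done.length < (done ++ l :: rest).length := by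
      simp only [List.length_append, List.length_cons]; omega
    have hcur : (done ++ l :: rest).getD done.length [] = l := pvGetD_append done l rest
    have hnxt : (done ++ l :: rest).getD (done.length + 1) [] = rest.head?.getD [] :=
      pvGetD_append_succ done l rest
    have happ : done ++ l :: rest = (done ++ [l]) ++ rest := by simp
    have hlen1 : done.length + 1 = (done ++ [l]).length := by simp
    have hproc : procB badCommand (l :: rest)
        = l :: (if pvEmit badCommand l rest.head? then [warnB badCommand l] else [])
            ++ procB badCommand rest := rfl
    have hskipA : (decide (done.length + 1 < (done ++ l :: rest).length)
        && PySem.Chars.startswith (PySem.Chars.lstrip ((done ++ l :: rest).getD (done.length + 1) [])) ['%']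
        && PySem.Chars.isIn pvChecked ((done ++ l :: rest).getD (done.length + 1) [])
        && PySem.Chars.isIn badCommand ((done ++ l :: rest).getD (done.length + 1) []))
        = pvSkipByNext badCommand (rest.head?.getD []) := by
      rw [hnxt]
      cases rest with
      | nil =>
        have hn : ¬ (done.length + 1 < (done ++ [l] : List (List Char)).length) := by
          simp only [List.length_append, List.length_cons, List.length_nil]; omega
        have h0 : pvSkipByNext badCommand [] = false := rfl
        simp [hn, h0]
      | cons t ts =>
        have hy : done.length + 1 < (done ++ l :: t :: ts).length := by
          simp only [List.length_append, List.length_cons]; omega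
        simp [hy, pvSkipByNext, Bool.and_assoc]
    rw [loopA.eq_def]
    dsimp only
    rw [if_pos hlt, hcur, hskipA]
    by_cases hcom : PySem.Chars.startswith (PySem.Chars.lstrip l) ['%'] = true
    · rw [if_neg (by simp [hcom])]
      rw [happ, hlen1, ih (done ++ [l]) (f + 1) (by omega) hhyp.2]
      have hemit : pvEmit badCommand l rest.head? = false := by
        rw [pvEmit, needsB_eq, hcom]
        simp
      rw [hproc, hemit]
      simp
    · by_cases hsk : pvSkipByNext badCommand (rest.head?.getD []) = true
      · rw [if_neg (by simp [hsk])]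
        rw [happ, hlen1, ih (done ++ [l]) (f + 1) (by omega) hhyp.2]
        have hemit : pvEmit badCommand l rest.head? = false := by
          rw [pvEmit, needsB_eq, hsk]
          simp
        rw [hproc, hemit]
        simp
      · rw [if_pos (by simp [hcom, hsk])]
        by_cases hfound : (PySem.List.pyRange 0 ((l.length : Int) - badCommand.length + 1) 1).any
            (fun p => matchAtB badCommand (decide (badCommand ∈ pvBigs)) badCommand.length l p) = true
        · have hemit : pvEmit badCommand l rest.head? = true := by
            rw [pvEmit, needsB_eq, hfound]
            simp [hcom, hsk]
          -- l is not all whitespace, else A would have raised (excluded by Pre_)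
          have hall : l.all PySem.Chars.isspace = false := by
            rw [List.any_eq_true] at hfound
            obtain ⟨x, hx, hmt⟩ := hfound
            obtain ⟨hx0, hxlt⟩ := (PySem.List.mem_pyRange_one).mp hx
            have hsl := matchAt_slice _ _ _ _ _ hmt
            have hinf : badCommand <:+: l := by
              rw [← hsl, PySem.List.slice_toNat _ hx0 (by omega)]
              exact ((List.take_prefix _ _).isInfix).trans (List.drop_suffix _ _).isInfix
            by_cases hwb : badCommand.all PySem.Chars.isspace = true
            · have h1 := hhyp.1 hwb
              have hin : PySem.Chars.isIn badCommand l = true :=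
                (PySem.Chars.isIn_iff_infix _ _).mpr hinf
              have hskf : pvSkipByNext badCommand (rest.head?.getD []) = false :=
                Bool.eq_false_iff.mpr hsk
              by_contra hcontra
              have hallt : l.all PySem.Chars.isspace = true := by
                cases hb : l.all PySem.Chars.isspace
                · exact absurd hb hcontra
                · rfl
              exact h1 ⟨hallt, hin, hskf⟩
            · obtain ⟨c, hc, hcw⟩ : ∃ c ∈ badCommand, ¬ PySem.Chars.isspace c = true := by
                rw [List.all_eq_true] at hwb
                push Not at hwb
                simpa using hwb
              have hcl : c ∈ l := hinf.subset hc
              rw [Bool.eq_false_iff]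
              intro hallw
              rw [List.all_eq_true] at hallw
              exact hcw (hallw c hcl)
          rw [if_pos ((found_iff l badCommand).mpr hfound)]
          rw [show ((done.length : Int) + 1) = (((done.length + 1 : Nat)) : Int) by push_cast; ring]
          rw [PySem.List.insert_natCast _ _ _ (by
            simp only [List.length_append, List.length_cons]; omega)]
          have htake : (done ++ l :: rest).take (done.length + 1) = done ++ [l] :=
            pvTake_append done l rest
          have hdrop : (done ++ l :: rest).drop (done.length + 1) = rest :=
            pvDrop_append done l rest
          rw [htake, hdrop, warnA_eq_warnB badCommand l hall, hlen1]
          rw [loopA.eq_def]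
          dsimp only
          have hlt2 : ((done ++ [l] : List (List Char))).length
              < ((done ++ [l]) ++ (warnB badCommand l) :: rest).length := by
            simp only [List.length_append, List.length_cons]; omega
          rw [if_pos hlt2, pvGetD_append (done ++ [l]) (warnB badCommand l) rest]
          rw [if_neg (by simp [warnB_comment])]
          have happ2 : (done ++ [l]) ++ (warnB badCommand l) :: rest
              = ((done ++ [l]) ++ [warnB badCommand l]) ++ rest := by simp
          have hlen2 : ((done ++ [l] : List (List Char))).length + 1
              = (((done ++ [l]) ++ [warnB badCommand l] : List (List Char))).length := by simp
          rw [happ2, hlen2, ih _ f hf' hhyp.2]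
          rw [hproc, hemit]
          simp
        · rw [if_neg (by
            intro h
            exact hfound ((found_iff l badCommand).mp h))]
          rw [happ, hlen1, ih (done ++ [l]) (f + 1) (by omega) hhyp.2]
          have hemit : pvEmit badCommand l rest.head? = false := by
            rw [pvEmit, needsB_eq]
            simp [hfound]
          rw [hproc, hemit]
          simp

-- ===== VERDICT (by name: the statement is the Claim_ definition above) =====
theorem insertWarnings_spec : Claim_equal_insertWarnings := by
  intro lines badCommand _ hpre
  unfold Spec_insertWarnings
  rw [alt_eq_procB]
  unfold insertWarnings
  have := loopA_eq badCommand.toList (lines.map String.toList) [] (2 * lines.length + 1)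
    (by simp) (pre_to_hyp lines badCommand hpre)
  simpa using congrArg (List.map String.ofList) this
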